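-- pv_equiv track=rewrite | github.com/akashh-dotcom/RittDocConverterFullPackage | RittDocConverter-main (1)/RittDocConverter-main/docbook_builder.py | get_linkend_element_type
-- ===== SOURCE A (Python) =====
-- from typing import Dict, List, Optional, Set, Tuple, Any, Callable, Union
--
-- XSL_LINKEND_PREFIXES = {
--     'fg': 'figure',      # fg0001 -> figure
--     'eq': 'equation',    # eq0001 -> equation
--     'ta': 'table',       # ta0001 -> table
--     'gl': 'glossary',    # gl0001 -> glossentry
--     'bib': 'bibliography',  # bib0001 -> bibliomixed
--     'qa': 'qandaset',    # qa0001 -> qandaentry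
--     'pr': 'preface',     # pr0001 -> preface
--     'vd': 'video',       # vd0001 -> video section
--     'ad': 'appendix',    # ad0001 -> appendix
--     'ch': 'chapter',     # ch0001 -> chapter
--     's': 'section',      # s0001 -> sect1/sect2/etc
--     'fn': 'footnote',    # fn0001 -> footnote
-- }
--
-- def get_linkend_element_type(linkend: str) -> Optional[str]:
--     """
--     Parse linkend ID to determine target element type.
--
--     XSL uses ID prefixes to determine link rendering:
--     - fg0001 -> figure
--     - eq0001 -> equation
--     - ta0001 -> table
--     etc.
--
--     Args:
--         linkend: The linkend attribute value (e.g., "fg0001")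
--
--     Returns:
--         Element type string (e.g., "figure") or None if no prefix match
--     """
--     if not linkend:
--         return None
--
--     # Check each prefix from longest to shortest
--     for prefix, elem_type in sorted(XSL_LINKEND_PREFIXES.items(),
--                                     key=lambda x: -len(x[0])):
--         if linkend.startswith(prefix):
--             return elem_type
--     return None
-- ===== SOURCE B (Python) =====
-- XSL_LINKEND_PREFIXES = {
--     'fg': 'figure',
--     'eq': 'equation',
--     'ta': 'table',
--     'gl': 'glossary',
--     'bib': 'bibliography',
--     'qa': 'qandaset',
--     'pr': 'preface',
--     'vd': 'video',
--     'ad': 'appendix',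
--     'ch': 'chapter',
--     's': 'section',
--     'fn': 'footnote',
-- }
--
-- def get_linkend_element_type(linkend):
--     if not linkend:
--         return None
--     # longest-prefix match via direct dict lookups on slices of each distinct length
--     for L in (3, 2, 1):
--         candidate = linkend[:L]
--         if candidate in XSL_LINKEND_PREFIXES:
--             return XSL_LINKEND_PREFIXES[candidate]
--     return None
-- ===== Notes on version B (the rewrite author's own statement) =====
-- stated objective: idiomatic
-- what changed: Replaces the sort-then-linear-scan over all 12 (prefix, type) pairs with startswith tests by longest-prefix matching over the three distinct prefix lengths: slice linkend[:L] for L in (3,2,1) and do a direct dict lookup, so prefix entries are never iterated.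
import Mathlib
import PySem

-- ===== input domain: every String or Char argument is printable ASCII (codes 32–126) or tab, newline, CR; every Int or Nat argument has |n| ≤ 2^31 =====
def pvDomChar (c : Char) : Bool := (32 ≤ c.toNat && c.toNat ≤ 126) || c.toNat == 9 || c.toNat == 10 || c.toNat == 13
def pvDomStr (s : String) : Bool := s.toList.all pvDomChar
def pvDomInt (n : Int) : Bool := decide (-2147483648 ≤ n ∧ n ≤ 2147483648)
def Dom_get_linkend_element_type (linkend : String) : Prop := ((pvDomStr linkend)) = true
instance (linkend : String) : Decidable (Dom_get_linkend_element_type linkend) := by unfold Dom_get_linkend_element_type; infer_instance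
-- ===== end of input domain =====

-- B replaces A's sort-then-scan over all 12 (prefix, type) entries with three direct
-- dict lookups on the length-3/2/1 slices of linkend (longest-prefix match); same value everywhere.

-- ===== PORT A =====
def XSL_LINKEND_PREFIXES : PySem.Dict String String :=
  PySem.Dict.ofList [("fg", "figure"), ("eq", "equation"), ("ta", "table"),
    ("gl", "glossary"), ("bib", "bibliography"), ("qa", "qandaset"),
    ("pr", "preface"), ("vd", "video"), ("ad", "appendix"), ("ch", "chapter"),
    ("s", "section"), ("fn", "footnote")]

-- A's 'for prefix, elem_type in sorted(...)' loop with early return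
def pvLoopA (linkend : String) : List (String × String) → Option String
  | [] => none
  | (pfx, elemType) :: rest =>
      if PySem.Str.startswith linkend pfx then some elemType else pvLoopA linkend rest

def get_linkend_element_type (linkend : String) : Option String :=
  if linkend == "" then none
  else
    pvLoopA linkend
      (PySem.List.sorted XSL_LINKEND_PREFIXES.items (fun x => -(PySem.Str.len x.1)) false)

-- ===== PORT B =====
-- B's 'for L in (3, 2, 1)' loop with early return
def pvLoopB (linkend : String) : List Int → Option String
  | [] => none
  | L :: rest =>
      let candidate := PySem.Str.slice linkend none (some L)
      if XSL_LINKEND_PREFIXES.contains candidate then XSL_LINKEND_PREFIXES.get? candidate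
      else pvLoopB linkend rest

def get_linkend_element_type_alt (linkend : String) : Option String :=
  if linkend == "" then none
  else pvLoopB linkend [3, 2, 1]

-- ===== PRECONDITION & SPEC =====
def Spec_get_linkend_element_type (linkend : String) (out : Option String) : Prop := out = get_linkend_element_type_alt linkend
instance (linkend : String) (out : Option String) : Decidable (Spec_get_linkend_element_type linkend out) := by unfold Spec_get_linkend_element_type; infer_instance

-- ===== CLAIM (what is proved, stated in full; the proofs are below) =====
def Claim_equal_get_linkend_element_type : Prop := ∀ (linkend : String), Dom_get_linkend_element_type linkend → Spec_get_linkend_element_type linkend (get_linkend_element_type linkend)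

-- ===== LEMMAS AND PROOFS =====

-- Python's sorted is stable: the one 3-char prefix first, then the 2-char ones in
-- insertion order, then 's'.
theorem pvSortedLit : PySem.List.sorted XSL_LINKEND_PREFIXES.items (fun x => -(PySem.Str.len x.1)) false
  = [("bib", "bibliography"), ("fg", "figure"), ("eq", "equation"), ("ta", "table"),
     ("gl", "glossary"), ("qa", "qandaset"), ("pr", "preface"), ("vd", "video"),
     ("ad", "appendix"), ("ch", "chapter"), ("fn", "footnote"), ("s", "section")] := by decide

theorem pvDictLit : XSL_LINKEND_PREFIXES = PySem.Dict.mk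
    [("fg", "figure"), ("eq", "equation"), ("ta", "table"), ("gl", "glossary"),
     ("bib", "bibliography"), ("qa", "qandaset"), ("pr", "preface"), ("vd", "video"),
     ("ad", "appendix"), ("ch", "chapter"), ("s", "section"), ("fn", "footnote")] := by decide

theorem pvBeqToList (s t : String) : (s == t) = (s.toList == t.toList) := by
  rw [Bool.eq_iff_iff]; simp [String.toList_inj]

theorem pvMain (linkend : String) :
    get_linkend_element_type linkend = get_linkend_element_type_alt linkend := by
  unfold get_linkend_element_type get_linkend_element_type_alt
  rw [pvSortedLit]
  rcases h : linkend.toList with _ | ⟨a, _ | ⟨b, _ | ⟨c, rest⟩⟩⟩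
  · have hnil : linkend = "" := String.toList_inj.mp (by simp [h])
    simp [hnil]
  · simp [pvLoopA, pvLoopB, pvDictLit, pvBeqToList, h,
      PySem.Chars.startswith, PySem.List.slice, PySem.List.clampIdx,
      PySem.Dict.get?, PySem.Dict.contains, List.any, List.find?]
    by_cases hs : 's' = a
    · obtain rfl := hs; simp
    · simp [hs]
  · simp [pvLoopA, pvLoopB, pvDictLit, pvBeqToList, h,
      PySem.Chars.startswith, PySem.List.slice, PySem.List.clampIdx,
      PySem.Dict.get?, PySem.Dict.contains, List.any, List.find?]
    by_cases h1 : 'f' = a ∧ 'g' = b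
    · obtain ⟨rfl, rfl⟩ := h1; simp
    by_cases h2 : 'e' = a ∧ 'q' = b
    · obtain ⟨rfl, rfl⟩ := h2; simp
    by_cases h3 : 't' = a ∧ 'a' = b
    · obtain ⟨rfl, rfl⟩ := h3; simp
    by_cases h4 : 'g' = a ∧ 'l' = b
    · obtain ⟨rfl, rfl⟩ := h4; simp
    by_cases h5 : 'q' = a ∧ 'a' = b
    · obtain ⟨rfl, rfl⟩ := h5; simp
    by_cases h6 : 'p' = a ∧ 'r' = b
    · obtain ⟨rfl, rfl⟩ := h6; simp
    by_cases h7 : 'v' = a ∧ 'd' = b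
    · obtain ⟨rfl, rfl⟩ := h7; simp
    by_cases h8 : 'a' = a ∧ 'd' = b
    · obtain ⟨rfl, rfl⟩ := h8; simp
    by_cases h9 : 'c' = a ∧ 'h' = b
    · obtain ⟨rfl, rfl⟩ := h9; simp
    by_cases h10 : 'f' = a ∧ 'n' = b
    · obtain ⟨rfl, rfl⟩ := h10; simp
    by_cases hs : 's' = a
    · obtain rfl := hs; simp
    · simp [h1, h2, h3, h4, h5, h6, h7, h8, h9, h10, hs]
  · simp [pvLoopA, pvLoopB, pvDictLit, pvBeqToList, h,
      PySem.Chars.startswith, PySem.List.slice, PySem.List.clampIdx,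
      PySem.Dict.get?, PySem.Dict.contains, List.any, List.find?]
    by_cases hb : 'b' = a ∧ 'i' = b ∧ 'b' = c
    · obtain ⟨rfl, rfl, rfl⟩ := hb; simp
    by_cases h1 : 'f' = a ∧ 'g' = b
    · obtain ⟨rfl, rfl⟩ := h1; simp
    by_cases h2 : 'e' = a ∧ 'q' = b
    · obtain ⟨rfl, rfl⟩ := h2; simp
    by_cases h3 : 't' = a ∧ 'a' = b
    · obtain ⟨rfl, rfl⟩ := h3; simp
    by_cases h4 : 'g' = a ∧ 'l' = b
    · obtain ⟨rfl, rfl⟩ := h4; simp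
    by_cases h5 : 'q' = a ∧ 'a' = b
    · obtain ⟨rfl, rfl⟩ := h5; simp
    by_cases h6 : 'p' = a ∧ 'r' = b
    · obtain ⟨rfl, rfl⟩ := h6; simp
    by_cases h7 : 'v' = a ∧ 'd' = b
    · obtain ⟨rfl, rfl⟩ := h7; simp
    by_cases h8 : 'a' = a ∧ 'd' = b
    · obtain ⟨rfl, rfl⟩ := h8; simp
    by_cases h9 : 'c' = a ∧ 'h' = b
    · obtain ⟨rfl, rfl⟩ := h9; simp
    by_cases h10 : 'f' = a ∧ 'n' = b
    · obtain ⟨rfl, rfl⟩ := h10; simp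
    by_cases hs : 's' = a
    · obtain rfl := hs; simp
    · simp [hb, h1, h2, h3, h4, h5, h6, h7, h8, h9, h10, hs]

-- ===== VERDICT (by name: the statement is the Claim_ definition above) =====
theorem get_linkend_element_type_spec : Claim_equal_get_linkend_element_type := by
  intro linkend _
  unfold Spec_get_linkend_element_type
  exact pvMain linkend
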